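-- pv_equiv track=rewrite | github.com/MoqiYNU/RCTool | analyzer/erp_exp2_GA.py | is_redu_interval
-- ===== SOURCE A (Python) =====
-- def is_redu_interval(index, interval, intervals):
--     [xi, yi] = interval
--     for indext, [xt, yt] in enumerate(intervals):
--         if index == indext:
--             continue
--         if yt <= xi:
--             return True
--     return False
-- ===== SOURCE B (Python) =====
-- def is_redu_interval(index, interval, intervals):
--     xi, yi = interval
--     # count-and-correct: count ALL intervals ending at or before xi,
--     # then remove the self interval's own contribution (if index names one).
--     total = sum(1 for xt, yt in intervals if yt <= xi)
--     if 0 <= index < len(intervals):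
--         xt, yt = intervals[index]
--         if yt <= xi:
--             total -= 1
--     return total > 0
-- ===== Notes on version B (the rewrite author's own statement) =====
-- stated objective: alternative
-- what changed: Replaced the existential early-exit scan over non-self intervals with a count-and-correct scheme: count all intervals ending at or before xi, subtract the contribution of the interval at position index via a direct lookup, and test positivity of the corrected count.
-- outside the precondition, e.g. on is_redu_interval(5, [0, 0], [[-5, -5], [0]]): A returns True, B raises ValueError
import Mathlib
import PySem

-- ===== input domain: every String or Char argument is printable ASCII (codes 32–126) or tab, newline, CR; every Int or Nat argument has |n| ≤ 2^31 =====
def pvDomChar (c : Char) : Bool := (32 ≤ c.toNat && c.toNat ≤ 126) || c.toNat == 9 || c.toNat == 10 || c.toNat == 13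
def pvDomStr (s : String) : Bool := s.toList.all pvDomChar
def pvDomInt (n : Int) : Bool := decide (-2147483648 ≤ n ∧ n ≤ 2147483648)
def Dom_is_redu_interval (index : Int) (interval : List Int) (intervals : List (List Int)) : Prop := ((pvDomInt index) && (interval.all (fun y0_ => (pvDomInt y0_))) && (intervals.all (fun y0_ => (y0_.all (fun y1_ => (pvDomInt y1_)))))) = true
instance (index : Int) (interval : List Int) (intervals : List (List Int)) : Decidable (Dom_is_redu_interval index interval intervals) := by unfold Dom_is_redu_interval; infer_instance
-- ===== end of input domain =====

-- ===== PORT A =====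
-- B replaces A's existential early-exit scan by count-and-correct: count all intervals ending
-- at or before xi, subtract the self interval's contribution via a lookup, test positivity
-- (alternative decomposition, same cost).
-- A's loop: scan enumerate(intervals), skip position == index, return True on the first yt <= xi.
def pvGoA (index xi : Int) : Int → List (List Int) → Bool
  | _, [] => false
  | i, iv :: rest =>
    if index = i then pvGoA index xi (i + 1) rest
    else
      match iv with
      | [_, yt] => if yt ≤ xi then true else pvGoA index xi (i + 1) rest
      | _ => false      -- Python raises unpacking here; excluded by Pre_

def is_redu_interval (index : Int) (interval : List Int) (intervals : List (List Int)) : Bool :=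
  match interval with
  | [xi, _] => pvGoA index xi 0 intervals
  | _ => false          -- Python raises unpacking here; excluded by Pre_

-- ===== PORT B =====
-- contribution of one interval to the count (0 for a malformed element, excluded by Pre_)
def pvC1 (xi : Int) (iv : List Int) : Int :=
  match iv with
  | [_, yt] => if yt ≤ xi then 1 else 0
  | _ => 0

def is_redu_interval_alt (index : Int) (interval : List Int) (intervals : List (List Int)) : Bool :=
  match interval with
  | [xi, _] =>
    -- total = sum(1 for xt, yt in intervals if yt <= xi)
    let total : Int := (intervals.map (pvC1 xi)).sum
    -- if 0 <= index < len(intervals): subtract self contribution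
    let total : Int :=
      if 0 ≤ index ∧ index < intervals.length then
        match PySem.List.pyGet? intervals index with
        | some [_, yt] => if yt ≤ xi then total - 1 else total
        | _ => total    -- malformed element; excluded by Pre_
      else total
    decide (0 < total)
  | _ => false          -- Python raises unpacking here; excluded by Pre_

-- ===== PRECONDITION & SPEC =====
-- Pre_ excludes the tuple-unpacking ValueErrors: interval must be a pair and every element of
-- intervals a pair.  This is slightly narrower than A's exact returning domain: A can return True
-- before reaching a malformed later element, while B (which scans the whole list) raises
-- there — an unmatchable value, see the cited example.
def Pre_is_redu_interval (_index : Int) (interval : List Int) (intervals : List (List Int)) : Prop :=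
  interval.length = 2 ∧ ∀ iv ∈ intervals, iv.length = 2
instance (index : Int) (interval : List Int) (intervals : List (List Int)) : Decidable (Pre_is_redu_interval index interval intervals) := by unfold Pre_is_redu_interval; infer_instance
def pvWitness_is_redu_interval : Int × List Int × List (List Int) := (1, [3, 5], [[0, 2], [3, 4]])

def Spec_is_redu_interval (index : Int) (interval : List Int) (intervals : List (List Int)) (out : Bool) : Prop := out = is_redu_interval_alt index interval intervals
instance (index : Int) (interval : List Int) (intervals : List (List Int)) (out : Bool) : Decidable (Spec_is_redu_interval index interval intervals out) := by unfold Spec_is_redu_interval; infer_instance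

-- ===== CLAIM (what is proved, stated in full; the proofs are below) =====
def Claim_equal_is_redu_interval : Prop := ∀ (index : Int) (interval : List Int) (intervals : List (List Int)), Dom_is_redu_interval index interval intervals → Pre_is_redu_interval index interval intervals → Spec_is_redu_interval index interval intervals (is_redu_interval index interval intervals)

-- ===== LEMMAS AND PROOFS =====

-- proof-side names for B's two stages
def pvCnt (xi : Int) (l : List (List Int)) : Int := (l.map (pvC1 xi)).sum

def pvSelf (xi index : Int) (l : List (List Int)) : Int :=
  if 0 ≤ index ∧ index < l.length then
    match PySem.List.pyGet? l index with
    | some [_, yt] => if yt ≤ xi then 1 else 0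
    | _ => 0
  else 0

lemma pvC1_nonneg (xi : Int) (iv : List Int) : 0 ≤ pvC1 xi iv := by
  unfold pvC1; split <;> first | split <;> omega | omega

lemma pvCnt_nonneg (xi : Int) (l : List (List Int)) : 0 ≤ pvCnt xi l := by
  induction l with
  | nil => simp [pvCnt]
  | cons a t ih =>
      have := pvC1_nonneg xi a
      simp only [pvCnt, List.map_cons, List.sum_cons] at *
      omega

lemma pvCnt_pos_of_mem (xi : Int) {l : List (List Int)} {iv : List Int}
    (hm : iv ∈ l) (h1 : 0 < pvC1 xi iv) : 1 ≤ pvCnt xi l := by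
  induction l with
  | nil => simp at hm
  | cons a t ih =>
      simp only [pvCnt, List.map_cons, List.sum_cons]
      rcases List.mem_cons.mp hm with h | h
      · subst h
        have := pvCnt_nonneg xi t
        simp only [pvCnt] at this ⊢; omega
      · have := ih h
        have := pvC1_nonneg xi a
        simp only [pvCnt] at *; omega

lemma pvSelf_le_cnt (xi index : Int) (l : List (List Int)) : pvSelf xi index l ≤ pvCnt xi l := by
  unfold pvSelf
  split
  · rcases hg : PySem.List.pyGet? l index with _ | iv
    · simpa [hg] using pvCnt_nonneg xi l
    · have hm : iv ∈ l := PySem.List.mem_of_pyGet?_eq_some l hg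
      match iv with
      | [] => simpa using pvCnt_nonneg xi l
      | [a] => simpa using pvCnt_nonneg xi l
      | a :: b :: c :: r => simpa using pvCnt_nonneg xi l
      | [a, b] =>
          by_cases hle : b ≤ xi
          · have : 0 < pvC1 xi [a, b] := by simp [pvC1, hle]
            have := pvCnt_pos_of_mem xi hm this
            simp [hle]; omega
          · simpa [hle] using pvCnt_nonneg xi l
  · exact pvCnt_nonneg xi l

lemma pvSelf_nil (xi d : Int) : pvSelf xi d [] = 0 := by
  unfold pvSelf
  have : ¬ (0 ≤ d ∧ d < (([] : List (List Int)).length : Int)) := by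
    simp only [List.length_nil, Nat.cast_zero]; omega
  rw [if_neg this]

lemma pvSelf_zero_cons (xi a b : Int) (rest : List (List Int)) :
    pvSelf xi 0 ([a, b] :: rest) = pvC1 xi [a, b] := by
  simp [pvSelf, pvC1]

lemma pvSelf_shift (xi d : Int) (iv : List Int) (rest : List (List Int)) (hd : d ≠ 0) :
    pvSelf xi d (iv :: rest) = pvSelf xi (d - 1) rest := by
  unfold pvSelf
  by_cases h1 : 0 ≤ d ∧ d < (iv :: rest).length
  · have h2 : 0 ≤ d - 1 ∧ d - 1 < (rest.length : Int) := by
      simp [List.length_cons] at h1; omega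
    have hget : PySem.List.pyGet? (iv :: rest) d = PySem.List.pyGet? rest (d - 1) := by
      rw [PySem.List.pyGet?_of_nonneg _ h1.1, PySem.List.pyGet?_of_nonneg _ h2.1]
      have : d.toNat = (d - 1).toNat + 1 := by omega
      rw [this]
      simp
    simp only [h1, h2, hget]
  · have h2 : ¬ (0 ≤ d - 1 ∧ d - 1 < (rest.length : Int)) := by
      simp [List.length_cons] at h1 ⊢; omega
    simp only [h1, h2, if_false]

-- A's scan equals "corrected count is positive"
lemma pvGoA_eq_cnt (xi : Int) :
    ∀ (l : List (List Int)), (∀ iv ∈ l, iv.length = 2) →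
      ∀ d : Int, pvGoA d xi 0 l = decide (0 < pvCnt xi l - pvSelf xi d l) := by
  intro l
  induction l with
  | nil => intro _ d; simp [pvGoA, pvCnt, pvSelf_nil]
  | cons iv rest ih =>
      intro h d
      have hiv : iv.length = 2 := h iv (by simp)
      have hrest : ∀ v ∈ rest, v.length = 2 := fun v hv => h v (by simp [hv])
      match iv, hiv with
      | [a, b], _ =>
        have hshift1 : ∀ e : Int, pvGoA e xi 1 rest = pvGoA (e - 1) xi 0 rest := by
          have key : ∀ (r : List (List Int)) (e i : Int), pvGoA e xi i r = pvGoA (e - i) xi 0 r := by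
            intro r
            induction r with
            | nil => intro e i; rfl
            | cons v t iht =>
                intro e i
                simp only [pvGoA]
                rw [iht (e - i) (0 + 1)]
                have h2 : e - i - (0 + 1) = e - (i + 1) := by ring
                rw [h2, iht e (i + 1)]
                by_cases he : e = i
                · rw [if_pos he, if_pos (by omega : e - i = 0)]
                · rw [if_neg he, if_neg (by omega : ¬ e - i = 0)]
          intro e
          have := key rest e 1
          simpa using this
        have hshift1' : ∀ e : Int, pvGoA e xi (0 + 1) rest = pvGoA (e - 1) xi 0 rest := by
          intro e; simpa using hshift1 e
        have hcnt : pvCnt xi ([a, b] :: rest) = pvC1 xi [a, b] + pvCnt xi rest := by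
          simp [pvCnt]
        by_cases hd : d = 0
        · subst hd
          simp only [pvGoA, ite_true]
          rw [hshift1' 0, (by norm_num : (0:Int) - 1 = -1), ih hrest (-1 : Int)]
          have hs0 : pvSelf xi (-1) rest = 0 := by
            unfold pvSelf
            have : ¬ (0 ≤ (-1 : Int) ∧ (-1 : Int) < (rest.length : Int)) := by omega
            rw [if_neg this]
          rw [pvSelf_zero_cons, hcnt, hs0]
          congr 1; apply propext; omega
        · have hne : d ≠ (0 : Int) := hd
          rw [pvSelf_shift xi d [a, b] rest hne, hcnt]
          by_cases hle : b ≤ xi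
          · have hc1 : pvC1 xi [a, b] = 1 := by simp [pvC1, hle]
            have h1 := pvSelf_le_cnt xi (d - 1) rest
            simp only [pvGoA, hc1]
            rw [if_neg hne, if_pos hle]
            simp
            omega
          · have hc1 : pvC1 xi [a, b] = 0 := by simp [pvC1, hle]
            simp only [pvGoA, hc1]
            rw [if_neg hne, if_neg hle, hshift1' d, ih hrest (d - 1)]
            congr 1; apply propext; omega

-- B's port computes exactly that corrected count
lemma alt_eq (index xi y : Int) (intervals : List (List Int)) :
    is_redu_interval_alt index [xi, y] intervals =
      decide (0 < pvCnt xi intervals - pvSelf xi index intervals) := by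
  simp only [is_redu_interval_alt, pvSelf, pvCnt]
  by_cases hc : 0 ≤ index ∧ index < (intervals.length : Int)
  · simp only [hc]
    rcases hg : PySem.List.pyGet? intervals index with _ | iv
    · simp
    · match iv with
      | [] => simp
      | [a] => simp
      | a :: b :: c :: r => simp
      | [a, b] =>
          by_cases hle : b ≤ xi
          · simp only [hle, ite_true]
            norm_num
          · simp [hle]
  · simp [hc]

-- ===== VERDICT (by name: the statement is the Claim_ definition above) =====
theorem is_redu_interval_spec : Claim_equal_is_redu_interval := by
  intro index interval intervals _ hpre
  obtain ⟨hlen, hall⟩ := hpre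
  unfold Spec_is_redu_interval
  match interval, hlen with
  | [xi, yi], _ =>
    rw [alt_eq]
    simp only [is_redu_interval]
    exact pvGoA_eq_cnt xi intervals hall index
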